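-- pv_equiv track=rewrite | github.com/ziebam/aoc2024 | day21/day21.py | get_numeric_paths
-- ===== SOURCE A (Python) =====
-- NUMERIC_KEYPAD = {
--     "7": (0, 0),
--     "8": (1, 0),
--     "9": (2, 0),
--     "4": (0, 1),
--     "5": (1, 1),
--     "6": (2, 1),
--     "1": (0, 2),
--     "2": (1, 2),
--     "3": (2, 2),
--     "0": (1, 3),
--     "A": (2, 3),
-- }
--
-- def get_numeric_paths(current, target):
--     x1, y1 = NUMERIC_KEYPAD[current]
--     x2, y2 = NUMERIC_KEYPAD[target]
--
--     horizontal = "<" if x2 < x1 else ">"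
--     vertical = "^" if y2 < y1 else "v"
--
--     dx = abs(x1 - x2)
--     dy = abs(y1 - y2)
--
--     paths = [vertical * dy + horizontal * dx, horizontal * dx + vertical * dy]
--     valid_paths = []
--     for path in paths:
--         new_x, new_y = x1, y1
--         for move in path:
--             match move:
--                 case "<":
--                     new_x -= 1
--                 case ">":
--                     new_x += 1
--                 case "^":
--                     new_y -= 1
--                 case "v":
--                     new_y += 1
--
--             if (0, 3) == (new_x, new_y):
--                 break
--         else:
--             valid_paths.append(path + "A")
--
--     return valid_paths
-- ===== SOURCE B (Python) =====
-- NUMERIC_KEYPAD = {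
--     "7": (0, 0),
--     "8": (1, 0),
--     "9": (2, 0),
--     "4": (0, 1),
--     "5": (1, 1),
--     "6": (2, 1),
--     "1": (0, 2),
--     "2": (1, 2),
--     "3": (2, 2),
--     "0": (1, 3),
--     "A": (2, 3),
-- }
--
-- def get_numeric_paths(current, target):
--     # Closed-form gap test instead of a move-by-move simulation: the only gap
--     # is (0, 3), and each candidate path is an L-shape, so it touches the gap
--     # iff one of its two straight legs passes through it.
--     x1, y1 = NUMERIC_KEYPAD[current]
--     x2, y2 = NUMERIC_KEYPAD[target]
--
--     horizontal = ("<" if x2 < x1 else ">") * abs(x1 - x2)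
--     vertical = ("^" if y2 < y1 else "v") * abs(y1 - y2)
--
--     # vertical leg first: visits (x1, y2) cells, then (x, y2) cells up to x2
--     vert_first_bad = (x1 == 0 and y2 == 3) or (y2 == 3 and x2 == 0)
--     # horizontal leg first: visits (x, y1) cells up to x2, then (x2, y) cells
--     horiz_first_bad = (y1 == 3 and x2 == 0) or (x2 == 0 and y2 == 3)
--
--     valid_paths = []
--     if not vert_first_bad:
--         valid_paths.append(vertical + horizontal + "A")
--     if not horiz_first_bad:
--         valid_paths.append(horizontal + vertical + "A")
--     return valid_paths
-- ===== Notes on version B (the rewrite author's own statement) =====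
-- stated objective: simpler
-- what changed: Replaces the per-path move-by-move simulation loop (with break/else) by a closed-form geometric test of whether each L-shaped candidate leg passes through the gap (0,3), emitting each candidate independently.
import Mathlib
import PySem

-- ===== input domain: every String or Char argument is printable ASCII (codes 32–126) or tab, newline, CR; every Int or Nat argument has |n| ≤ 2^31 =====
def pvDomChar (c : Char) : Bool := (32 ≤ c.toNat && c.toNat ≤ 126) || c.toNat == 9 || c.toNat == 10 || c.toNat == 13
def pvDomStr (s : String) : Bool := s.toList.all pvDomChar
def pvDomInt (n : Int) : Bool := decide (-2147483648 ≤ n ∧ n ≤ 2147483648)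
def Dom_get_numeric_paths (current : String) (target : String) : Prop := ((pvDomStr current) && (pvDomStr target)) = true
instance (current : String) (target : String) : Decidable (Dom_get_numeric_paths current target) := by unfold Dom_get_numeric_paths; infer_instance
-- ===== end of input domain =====

-- B replaces A's move-by-move simulation of each candidate path with a closed-form
-- geometric test of whether an L-shaped leg passes through the gap (0,3) (objective: simpler).

-- ===== PORT A =====
def NUMERIC_KEYPAD : PySem.Dict String (Int × Int) :=
  PySem.Dict.ofList [("7", (0, 0)), ("8", (1, 0)), ("9", (2, 0)),
                     ("4", (0, 1)), ("5", (1, 1)), ("6", (2, 1)),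
                     ("1", (0, 2)), ("2", (1, 2)), ("3", (2, 2)),
                     ("0", (1, 3)), ("A", (2, 3))]

-- s * n for a Python string
def pvStrMul (s : String) (n : Nat) : String := String.ofList (List.replicate n s.toList).flatten

-- the inner 'for move in path: … if (0,3)==(new_x,new_y): break / else: append' loop:
-- returns true iff the walk from (x,y) along moves ever steps onto (0,3)
def pvSimHitsGap (x y : Int) : List Char → Bool
  | [] => false
  | m :: rest =>
    let nx : Int := if m = '<' then x - 1 else if m = '>' then x + 1 else x
    let ny : Int := if m = '^' then y - 1 else if m = 'v' then y + 1 else y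
    if nx = 0 ∧ ny = 3 then true else pvSimHitsGap nx ny rest

def get_numeric_paths (current : String) (target : String) : List String :=
  match NUMERIC_KEYPAD.get? current, NUMERIC_KEYPAD.get? target with
  | some (x1, y1), some (x2, y2) =>
    let horizontal : String := if x2 < x1 then "<" else ">"
    let vertical : String := if y2 < y1 then "^" else "v"
    let dx := (x1 - x2).natAbs
    let dy := (y1 - y2).natAbs
    let paths : List String :=
      [pvStrMul vertical dy ++ pvStrMul horizontal dx,
       pvStrMul horizontal dx ++ pvStrMul vertical dy]
    paths.foldl (fun acc path =>
      if pvSimHitsGap x1 y1 path.toList then acc else acc ++ [path ++ "A"]) []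
  | _, _ => []  -- Python raises KeyError here; excluded by Pre_

-- ===== PORT B =====
def NUMERIC_KEYPAD_B : PySem.Dict String (Int × Int) :=
  PySem.Dict.ofList [("7", (0, 0)), ("8", (1, 0)), ("9", (2, 0)),
                     ("4", (0, 1)), ("5", (1, 1)), ("6", (2, 1)),
                     ("1", (0, 2)), ("2", (1, 2)), ("3", (2, 2)),
                     ("0", (1, 3)), ("A", (2, 3))]

def pvAltBody : Int × Int → Int × Int → List String
  | (x1, y1), (x2, y2) =>
    let horizontal : String := String.ofList (List.replicate (x1 - x2).natAbs (if x2 < x1 then '<' else '>'))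
    let vertical : String := String.ofList (List.replicate (y1 - y2).natAbs (if y2 < y1 then '^' else 'v'))
    let vert_first_bad : Bool := (x1 = 0 ∧ y2 = 3) ∨ (y2 = 3 ∧ x2 = 0)
    let horiz_first_bad : Bool := (y1 = 3 ∧ x2 = 0) ∨ (x2 = 0 ∧ y2 = 3)
    (if vert_first_bad then [] else [vertical ++ horizontal ++ "A"]) ++
    (if horiz_first_bad then [] else [horizontal ++ vertical ++ "A"])

def get_numeric_paths_alt (current : String) (target : String) : List String :=
  -- Python raises KeyError on a missing key; those inputs are excluded by Pre_
  ((NUMERIC_KEYPAD_B.get? current).bind fun p =>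
    (NUMERIC_KEYPAD_B.get? target).map fun q => pvAltBody p q).getD []

-- ===== PRECONDITION & SPEC =====
-- Pre_: both buttons must be keys of the keypad; on anything else Python A raises KeyError.
def Pre_get_numeric_paths (current : String) (target : String) : Prop :=
  current ∈ ["7", "8", "9", "4", "5", "6", "1", "2", "3", "0", "A"] ∧
  target ∈ ["7", "8", "9", "4", "5", "6", "1", "2", "3", "0", "A"]
instance (current : String) (target : String) : Decidable (Pre_get_numeric_paths current target) := by unfold Pre_get_numeric_paths; infer_instance

def pvWitness_get_numeric_paths : String × String := ("A", "7")

def Spec_get_numeric_paths (current : String) (target : String) (out : List String) : Prop := out = get_numeric_paths_alt current target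
instance (current : String) (target : String) (out : List String) : Decidable (Spec_get_numeric_paths current target out) := by unfold Spec_get_numeric_paths; infer_instance

-- ===== CLAIM (what is proved, stated in full; the proofs are below) =====
def Claim_equal_get_numeric_paths : Prop := ∀ (current : String) (target : String), Dom_get_numeric_paths current target → Pre_get_numeric_paths current target → Spec_get_numeric_paths current target (get_numeric_paths current target)

-- ===== LEMMAS AND PROOFS =====
-- finite domain: check all 11 × 11 key pairs
theorem get_numeric_paths_agree_on_keys :
    ∀ c ∈ ["7", "8", "9", "4", "5", "6", "1", "2", "3", "0", "A"],
    ∀ t ∈ ["7", "8", "9", "4", "5", "6", "1", "2", "3", "0", "A"],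
      get_numeric_paths c t = get_numeric_paths_alt c t := by decide

-- ===== VERDICT (by name: the statement is the Claim_ definition above) =====
theorem get_numeric_paths_spec : Claim_equal_get_numeric_paths := by
  intro c t _ hp
  exact get_numeric_paths_agree_on_keys c hp.1 t hp.2
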